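-- pv_equiv track=rewrite | github.com/oallaire-cyber/RIM_Alpha | visualization/edge_styles.py | filter_edges_by_type
-- ===== SOURCE A (Python) =====
-- from typing import Dict, Any, Optional, List, Tuple
--
-- def filter_edges_by_type(
--     edges: List[Dict[str, Any]],
--     include_influences: bool = True,
--     include_mitigations: bool = True,
--     include_impacts: bool = True
-- ) -> List[Dict[str, Any]]:
--     """
--     Filter edges by relationship type.
--
--     Args:
--         edges: List of edge dictionaries
--         include_influences: Include INFLUENCES edges
--         include_mitigations: Include MITIGATES edges
--         include_impacts: Include IMPACTS_TPO edges
--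
--     Returns:
--         Filtered list of edges
--     """
--     filtered = []
--
--     for edge in edges:
--         edge_type = edge.get("edge_type", "INFLUENCES")
--
--         if edge_type == "INFLUENCES" and include_influences:
--             filtered.append(edge)
--         elif edge_type == "MITIGATES" and include_mitigations:
--             filtered.append(edge)
--         elif edge_type == "IMPACTS_TPO" and include_impacts:
--             filtered.append(edge)
--
--     return filtered
-- ===== SOURCE B (Python) =====
-- def filter_edges_by_type(
--     edges,
--     include_influences=True,
--     include_mitigations=True,
--     include_impacts=True,
-- ):
--     # Stage 1: keep only edges of a recognized type (unknown types never survive).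
--     result = [e for e in edges
--               if e.get("edge_type", "INFLUENCES")
--               in ("INFLUENCES", "MITIGATES", "IMPACTS_TPO")]
--     # Stage 2: subtract each disabled type in its own pass.
--     for flag, t in ((include_influences, "INFLUENCES"),
--                     (include_mitigations, "MITIGATES"),
--                     (include_impacts, "IMPACTS_TPO")):
--         if not flag:
--             result = [e for e in result
--                       if e.get("edge_type", "INFLUENCES") != t]
--     return result
-- ===== Notes on version B (the rewrite author's own statement) =====
-- stated objective: alternative
-- what changed: Instead of one pass deciding per edge with an if/elif chain, B works subtractively in stages: first keep only edges of a recognized type, then for each disabled flag run a separate pass removing that type.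
import Mathlib
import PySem

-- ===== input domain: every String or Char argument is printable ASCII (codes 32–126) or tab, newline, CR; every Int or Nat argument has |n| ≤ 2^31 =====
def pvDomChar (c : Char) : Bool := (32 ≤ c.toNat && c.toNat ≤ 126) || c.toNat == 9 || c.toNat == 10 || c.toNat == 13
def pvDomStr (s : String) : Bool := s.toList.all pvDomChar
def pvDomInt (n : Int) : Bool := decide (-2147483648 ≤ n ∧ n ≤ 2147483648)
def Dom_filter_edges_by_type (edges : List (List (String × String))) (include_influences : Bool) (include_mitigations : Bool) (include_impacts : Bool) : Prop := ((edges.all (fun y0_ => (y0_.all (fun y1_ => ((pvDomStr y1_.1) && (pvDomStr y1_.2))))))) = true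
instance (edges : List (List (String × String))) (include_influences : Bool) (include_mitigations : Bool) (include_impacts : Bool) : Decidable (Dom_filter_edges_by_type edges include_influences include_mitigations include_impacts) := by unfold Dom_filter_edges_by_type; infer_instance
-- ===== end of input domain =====

-- B replaces A's single additive pass with an if/elif chain by staged subtractive
-- filtering: keep recognized types, then one removal pass per disabled flag (alternative; same cost).

-- ===== PORT A =====
def filter_edges_by_type (edges : List (List (String × String))) (include_influences : Bool) (include_mitigations : Bool) (include_impacts : Bool) : List (List (String × String)) :=
  edges.foldl (fun filtered edge =>
    let edge_type := PySem.Dict.getD ⟨edge⟩ "edge_type" "INFLUENCES"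
    if edge_type == "INFLUENCES" && include_influences then filtered ++ [edge]
    else if edge_type == "MITIGATES" && include_mitigations then filtered ++ [edge]
    else if edge_type == "IMPACTS_TPO" && include_impacts then filtered ++ [edge]
    else filtered) []

-- ===== PORT B =====
-- B: keep only recognized edge types, then subtract each disabled type in its own pass
def edgeTypeOf (edge : List (String × String)) : String :=
  PySem.Dict.getD ⟨edge⟩ "edge_type" "INFLUENCES"

def filter_edges_by_type_alt (edges : List (List (String × String))) (include_influences : Bool) (include_mitigations : Bool) (include_impacts : Bool) : List (List (String × String)) :=
  let r0 := edges.filter (fun e => edgeTypeOf e == "INFLUENCES" || edgeTypeOf e == "MITIGATES" || edgeTypeOf e == "IMPACTS_TPO")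
  let r1 := if include_influences then r0 else r0.filter (fun e => edgeTypeOf e != "INFLUENCES")
  let r2 := if include_mitigations then r1 else r1.filter (fun e => edgeTypeOf e != "MITIGATES")
  if include_impacts then r2 else r2.filter (fun e => edgeTypeOf e != "IMPACTS_TPO")

-- ===== PRECONDITION & SPEC =====
def Spec_filter_edges_by_type (edges : List (List (String × String))) (include_influences : Bool) (include_mitigations : Bool) (include_impacts : Bool) (out : List (List (String × String))) : Prop := out = filter_edges_by_type_alt edges include_influences include_mitigations include_impacts
instance (edges : List (List (String × String))) (include_influences : Bool) (include_mitigations : Bool) (include_impacts : Bool) (out : List (List (String × String))) : Decidable (Spec_filter_edges_by_type edges include_influences include_mitigations include_impacts out) := by unfold Spec_filter_edges_by_type; infer_instance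

-- ===== CLAIM (what is proved, stated in full; the proofs are below) =====
def Claim_equal_filter_edges_by_type : Prop := ∀ (edges : List (List (String × String))) (include_influences : Bool) (include_mitigations : Bool) (include_impacts : Bool), Dom_filter_edges_by_type edges include_influences include_mitigations include_impacts → Spec_filter_edges_by_type edges include_influences include_mitigations include_impacts (filter_edges_by_type edges include_influences include_mitigations include_impacts)

-- ===== LEMMAS AND PROOFS =====

-- A's loop applied to one element appends the element iff the combined predicate holds
lemma step_eq (ii im ip : Bool) (acc : List (List (String × String))) (edge : List (String × String)) :
    (let edge_type := PySem.Dict.getD ⟨edge⟩ "edge_type" "INFLUENCES"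
     if edge_type == "INFLUENCES" && ii then acc ++ [edge]
     else if edge_type == "MITIGATES" && im then acc ++ [edge]
     else if edge_type == "IMPACTS_TPO" && ip then acc ++ [edge]
     else acc)
    = acc ++ (if (edgeTypeOf edge == "INFLUENCES" && ii
                || edgeTypeOf edge == "MITIGATES" && im
                || edgeTypeOf edge == "IMPACTS_TPO" && ip) then [edge] else []) := by
  simp only [edgeTypeOf]
  cases ii <;> cases im <;> cases ip <;>
    rcases Bool.eq_false_or_eq_true (PySem.Dict.getD ⟨edge⟩ "edge_type" "INFLUENCES" == "INFLUENCES") with h1 | h1 <;>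
    rcases Bool.eq_false_or_eq_true (PySem.Dict.getD ⟨edge⟩ "edge_type" "INFLUENCES" == "MITIGATES") with h2 | h2 <;>
    rcases Bool.eq_false_or_eq_true (PySem.Dict.getD ⟨edge⟩ "edge_type" "INFLUENCES" == "IMPACTS_TPO") with h3 | h3 <;>
    simp_all

-- A's fold is the single filter with the combined predicate
lemma loop_eq (ii im ip : Bool) (edges : List (List (String × String))) (acc : List (List (String × String))) :
    edges.foldl (fun filtered edge =>
      let edge_type := PySem.Dict.getD ⟨edge⟩ "edge_type" "INFLUENCES"
      if edge_type == "INFLUENCES" && ii then filtered ++ [edge]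
      else if edge_type == "MITIGATES" && im then filtered ++ [edge]
      else if edge_type == "IMPACTS_TPO" && ip then filtered ++ [edge]
      else filtered) acc
    = acc ++ edges.filter (fun edge => edgeTypeOf edge == "INFLUENCES" && ii
                || edgeTypeOf edge == "MITIGATES" && im
                || edgeTypeOf edge == "IMPACTS_TPO" && ip) := by
  induction edges generalizing acc with
  | nil => simp
  | cons e es ih =>
    rw [List.foldl_cons, step_eq ii im ip acc e, ih, List.filter_cons]
    by_cases h : (edgeTypeOf e == "INFLUENCES" && ii
                || edgeTypeOf e == "MITIGATES" && im
                || edgeTypeOf e == "IMPACTS_TPO" && ip) = true <;> simp [h]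

-- B's staged filters collapse to the same single filter
lemma alt_eq (ii im ip : Bool) (edges : List (List (String × String))) :
    filter_edges_by_type_alt edges ii im ip
    = edges.filter (fun edge => edgeTypeOf edge == "INFLUENCES" && ii
                || edgeTypeOf edge == "MITIGATES" && im
                || edgeTypeOf edge == "IMPACTS_TPO" && ip) := by
  unfold filter_edges_by_type_alt
  cases ii <;> cases im <;> cases ip <;>
    simp only [if_true, if_false, Bool.false_eq_true, List.filter_filter] <;>
    refine List.filter_congr ?_ <;> intro e _ <;>
    rcases Bool.eq_false_or_eq_true (edgeTypeOf e == "INFLUENCES") with h1 | h1 <;>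
    rcases Bool.eq_false_or_eq_true (edgeTypeOf e == "MITIGATES") with h2 | h2 <;>
    rcases Bool.eq_false_or_eq_true (edgeTypeOf e == "IMPACTS_TPO") with h3 | h3 <;>
    (try simp [h1, h2, h3, bne]) <;> simp_all

-- ===== VERDICT =====
theorem filter_edges_by_type_spec : Claim_equal_filter_edges_by_type := by
  intro edges ii im ip _
  unfold Spec_filter_edges_by_type filter_edges_by_type
  rw [loop_eq, alt_eq]
  simp
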